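-- pv_equiv track=rewrite | github.com/Andreasdahlberg/advent-of-code-2019 | day_1/fuel.py | calculate_required_fuel_for_module
-- ===== SOURCE A (Python) =====
-- def calculate_required_fuel_for_mass(mass):
--     return int(mass / 3) - 2
--
-- def calculate_required_fuel_for_module(module_mass):
--     total_fuel = 0
--     mass = module_mass
--
--     while True:
--         fuel = calculate_required_fuel_for_mass(mass)
--         if fuel > 0:
--             total_fuel += fuel
--             mass = fuel
--         else:
--             break
--
--     return total_fuel
-- ===== SOURCE B (Python) =====
-- def _fuel_steps(mass):
--     """Recursively build the list of cascading fuel amounts (each > 0)."""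
--     fuel = int(mass / 3) - 2
--     if fuel <= 0:
--         return []
--     return [fuel] + _fuel_steps(fuel)
--
-- def calculate_required_fuel_for_module(module_mass):
--     return sum(_fuel_steps(module_mass))
-- ===== Notes on version B (the rewrite author's own statement) =====
-- stated objective: alternative
-- what changed: Instead of A's while-loop with a running accumulator, B recursively materialises the list of cascading fuel amounts and then sums that list in a separate pass.
import Mathlib
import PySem

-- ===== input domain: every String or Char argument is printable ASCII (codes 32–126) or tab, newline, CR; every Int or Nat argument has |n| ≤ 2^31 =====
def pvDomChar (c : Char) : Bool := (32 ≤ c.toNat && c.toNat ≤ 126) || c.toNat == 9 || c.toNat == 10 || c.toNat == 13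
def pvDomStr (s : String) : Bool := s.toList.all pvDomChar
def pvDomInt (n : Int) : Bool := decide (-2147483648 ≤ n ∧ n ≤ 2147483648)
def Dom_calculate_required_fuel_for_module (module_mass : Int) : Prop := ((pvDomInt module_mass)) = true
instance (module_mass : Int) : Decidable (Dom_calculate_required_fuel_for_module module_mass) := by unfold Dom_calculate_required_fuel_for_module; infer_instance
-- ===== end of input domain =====

-- B builds the list of cascading fuel amounts recursively and sums it in a second pass,
-- replacing A's while-loop with a running accumulator (objective: alternative).


-- ===== PORT A =====
-- int(mass / 3): Python true division then truncation toward zero; for |mass| ≤ 2^31 the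
-- float quotient rounds within 2^-20 of the exact value, so int(mass/3) = Int.tdiv mass 3 exactly.
def calculate_required_fuel_for_mass (mass : Int) : Int := mass.tdiv 3 - 2

-- termination helper, cited by both ports' decreasing_by
theorem pv_fuel_toNat_lt (m : Int) (h : 0 < m.tdiv 3 - 2) : (m.tdiv 3 - 2).toNat < m.toNat := by
  by_cases hm : 0 ≤ m
  · rw [Int.tdiv_eq_ediv_of_nonneg hm] at h ⊢; omega
  · have h1 : 0 ≤ (-m).tdiv 3 := Int.tdiv_nonneg (by omega) (by norm_num)
    have h2 : (-m).tdiv 3 = -(m.tdiv 3) := Int.neg_tdiv ..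
    omega

-- the same bound phrased through A's helper (for A's decreasing_by)
theorem pv_fuelA_toNat_lt (m : Int) (h : 0 < calculate_required_fuel_for_mass m) :
    (calculate_required_fuel_for_mass m).toNat < m.toNat :=
  pv_fuel_toNat_lt m h

-- A's 'while True' loop, as structural recursion on the same (total_fuel, mass) state
def pvLoopA (total_fuel mass : Int) : Int :=
  let fuel := calculate_required_fuel_for_mass mass
  if fuel > 0 then pvLoopA (total_fuel + fuel) fuel
  else total_fuel
termination_by mass.toNat
decreasing_by exact pv_fuelA_toNat_lt _ (by omega)

def calculate_required_fuel_for_module (module_mass : Int) : Int :=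
  pvLoopA 0 module_mass

-- ===== PORT B =====
-- the list of cascading fuel amounts (Source B's _fuel_steps)
def pvFuelSteps (mass : Int) : List Int :=
  let fuel := mass.tdiv 3 - 2     -- int(mass / 3) - 2, exact on Dom as above
  if fuel ≤ 0 then []
  else [fuel] ++ pvFuelSteps fuel
termination_by mass.toNat
decreasing_by exact pv_fuel_toNat_lt _ (by omega)

def calculate_required_fuel_for_module_alt (module_mass : Int) : Int :=
  (pvFuelSteps module_mass).sum

-- ===== PRECONDITION & SPEC =====
def Spec_calculate_required_fuel_for_module (module_mass : Int) (out : Int) : Prop := out = calculate_required_fuel_for_module_alt module_mass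
instance (module_mass : Int) (out : Int) : Decidable (Spec_calculate_required_fuel_for_module module_mass out) := by unfold Spec_calculate_required_fuel_for_module; infer_instance

-- ===== CLAIM (what is proved, stated in full; the proofs are below) =====
def Claim_equal_calculate_required_fuel_for_module : Prop := ∀ (module_mass : Int), Dom_calculate_required_fuel_for_module module_mass → Spec_calculate_required_fuel_for_module module_mass (calculate_required_fuel_for_module module_mass)

-- ===== LEMMAS AND PROOFS =====
-- loop invariant: A's accumulator plus the sum of the remaining fuel steps
theorem pvLoopA_eq_add_sum (total mass : Int) :
    pvLoopA total mass = total + (pvFuelSteps mass).sum := by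
  induction total, mass using pvLoopA.induct with
  | case1 t m fuel hpos ih =>
    have hm : calculate_required_fuel_for_mass m = m.tdiv 3 - 2 := rfl
    have hpos' : calculate_required_fuel_for_mass m > 0 := hpos
    rw [pvLoopA, pvFuelSteps, ← hm]
    rw [if_pos hpos', if_neg (by omega), ih]
    simp; ring
  | case2 t m fuel hle =>
    have hm : calculate_required_fuel_for_mass m = m.tdiv 3 - 2 := rfl
    have hle' : ¬ calculate_required_fuel_for_mass m > 0 := hle
    rw [pvLoopA, pvFuelSteps, ← hm]
    rw [if_neg hle', if_pos (by omega)]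
    simp

-- ===== VERDICT (by name: the statement is the Claim_ definition above) =====
theorem calculate_required_fuel_for_module_spec : Claim_equal_calculate_required_fuel_for_module := by
  intro m _
  show calculate_required_fuel_for_module m = _
  rw [calculate_required_fuel_for_module, calculate_required_fuel_for_module_alt, pvLoopA_eq_add_sum]
  ring
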